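-- pv_equiv track=rewrite | github.com/lsn-tmm/master_thesis | Esercizi/vqe_qse_examples/commons/Evangelista.py | build_operators
-- ===== SOURCE A (Python) =====
-- def is_xx(i,a,n):
--     si = i//n
--     sa = a//n
--     if(si==sa): return True
--     else:       return False
--
-- def is_xxxx(i,a,j,b,n):
--     si = i//n
--     sa = a//n
--     sj = j//n
--     sb = b//n
--     if(si==sa and sj==sb and si==sj and i<j and a<b): return True
--     else: return False
--
-- def is_xxyy(i,a,j,b,n):
--     si = i//n
--     sa = a//n
--     sj = j//n
--     sb = b//n
--     if(si==sa and sj==sb and si!=sj): return True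
--     else: return False
--
-- def build_operators(occ,vrt,n):
--     op      = []
--     loop    = (len(occ)>0)
--     while(loop):
--        i   = occ[0]
--        dop = []
--        for a in vrt:
--            if(is_xx(i,a,n)): dop.append((i,a))
--        for j in occ[1:]:
--           sj = j//n
--           for a in vrt:
--               sa = a//n
--               for b in vrt:
--                   sb = b//n
--                   if(is_xxxx(i,a,j,b,n) or is_xxyy(i,a,j,b,n)):
--                      dop.append((i,a,j,b))
--        occ = occ[1:]
--        op += dop
--        loop = (len(occ)>0)
--     return op
-- ===== SOURCE B (Python) =====
-- def build_operators(occ, vrt, n):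
--     # Group the virtual orbitals by spin sector once; then emit per occupied
--     # orbital, walking only the relevant sector sublists (no per-pair tests).
--     sec = {}
--     for a in vrt:
--         sec.setdefault(a // n, []).append(a)
--
--     def emit(occ):
--         if not occ:
--             return []
--         i, rest = occ[0], occ[1:]
--         si = i // n
--         same = sec.get(si, [])
--         out = [(i, a) for a in same]
--         for j in rest:
--             sj = j // n
--             if sj == si:
--                 if i < j:
--                     out += [(i, a, j, b) for a in same for b in same if a < b]
--             else:
--                 out += [(i, a, j, b) for a in same for b in sec.get(sj, [])]
--         return out + emit(rest)
--
--     return emit(occ)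
-- ===== Notes on version B (the rewrite author's own statement) =====
-- stated objective: faster
-- what changed: B groups the virtual orbitals into per-spin-sector sublists with one dict pass and then emits singles/doubles by walking only the relevant sector sublists, instead of A's while/slice loop that tests is_xxxx/is_xxyy on every (a,b) pair of the full vrt list.
-- outside the precondition, e.g. on build_operators([1], [], 0): A returns [], B raises ZeroDivisionError
import Mathlib
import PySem

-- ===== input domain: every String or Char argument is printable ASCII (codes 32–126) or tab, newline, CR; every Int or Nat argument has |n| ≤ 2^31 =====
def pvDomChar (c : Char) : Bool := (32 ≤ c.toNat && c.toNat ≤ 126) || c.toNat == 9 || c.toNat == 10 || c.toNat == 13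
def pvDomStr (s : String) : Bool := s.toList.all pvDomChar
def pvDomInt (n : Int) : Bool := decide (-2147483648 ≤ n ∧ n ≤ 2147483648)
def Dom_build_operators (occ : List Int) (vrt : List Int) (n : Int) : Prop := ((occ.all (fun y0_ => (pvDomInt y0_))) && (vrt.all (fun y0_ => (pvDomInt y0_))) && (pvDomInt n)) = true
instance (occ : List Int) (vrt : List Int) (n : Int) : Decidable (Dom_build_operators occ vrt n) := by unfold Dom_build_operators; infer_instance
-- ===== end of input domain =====

-- B groups the virtual orbitals by spin sector once and walks only the relevant
-- sector sublists (objective: faster — removes the per-pair branch-tested scan).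

-- ===== PORT A =====
def is_xx (i a n : Int) : Bool :=
  let si := PySem.Int.floordiv i n
  let sa := PySem.Int.floordiv a n
  if si = sa then true else false

def is_xxxx (i a j b n : Int) : Bool :=
  let si := PySem.Int.floordiv i n
  let sa := PySem.Int.floordiv a n
  let sj := PySem.Int.floordiv j n
  let sb := PySem.Int.floordiv b n
  if si = sa ∧ sj = sb ∧ si = sj ∧ i < j ∧ a < b then true else false

def is_xxyy (i a j b n : Int) : Bool :=
  let si := PySem.Int.floordiv i n
  let sa := PySem.Int.floordiv a n
  let sj := PySem.Int.floordiv j n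
  let sb := PySem.Int.floordiv b n
  if si = sa ∧ sj = sb ∧ si ≠ sj then true else false

-- the while loop pops occ[0] and continues on occ[1:]: structural recursion on occ
def build_operators (occ : List Int) (vrt : List Int) (n : Int) : List (List Int) :=
  match occ with
  | [] => []
  | i :: rest =>
    let dop := vrt.foldl (fun acc a => if is_xx i a n then acc ++ [[i, a]] else acc) []
    let dop := rest.foldl (fun acc j =>
      vrt.foldl (fun acc a =>
        vrt.foldl (fun acc b =>
          if is_xxxx i a j b n || is_xxyy i a j b n then acc ++ [[i, a, j, b]] else acc)
          acc) acc) dop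
    dop ++ build_operators rest vrt n

-- ===== PORT B =====
def bo_group (vrt : List Int) (n : Int) : PySem.Dict Int (List Int) :=
  vrt.foldl (fun d a => d.modify (PySem.Int.floordiv a n) [] (fun l => l ++ [a])) PySem.Dict.empty

def bo_emit (sec : PySem.Dict Int (List Int)) (n : Int) : List Int → List (List Int)
  | [] => []
  | i :: rest =>
    let si := PySem.Int.floordiv i n
    let same := sec.getD si []
    let out := same.map (fun a => [i, a])
    let out := rest.foldl (fun out j =>
      let sj := PySem.Int.floordiv j n
      if sj = si then
        if i < j then
          out ++ same.flatMap (fun a => (same.filter (fun b => a < b)).map (fun b => [i, a, j, b]))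
        else out
      else
        out ++ same.flatMap (fun a => (sec.getD sj []).map (fun b => [i, a, j, b]))) out
    out ++ bo_emit sec n rest

def build_operators_alt (occ : List Int) (vrt : List Int) (n : Int) : List (List Int) :=
  bo_emit (bo_group vrt n) n occ

-- ===== PRECONDITION & SPEC =====
-- Pre_ excludes n = 0 (ZeroDivisionError in Python): A raises there unless both loops
-- are vacuous (occ or vrt empty, where it returns [] accidentally); B's up-front
-- grouping divides by n and raises on n = 0 whenever occ is nonempty.
def Pre_build_operators (occ : List Int) (vrt : List Int) (n : Int) : Prop := n ≠ 0
instance (occ : List Int) (vrt : List Int) (n : Int) : Decidable (Pre_build_operators occ vrt n) := by unfold Pre_build_operators; infer_instance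

def pvWitness_build_operators : List Int × List Int × Int := ([0, 4], [1, 2, 5], 4)

def Spec_build_operators (occ : List Int) (vrt : List Int) (n : Int) (out : List (List Int)) : Prop := out = build_operators_alt occ vrt n
instance (occ : List Int) (vrt : List Int) (n : Int) (out : List (List Int)) : Decidable (Spec_build_operators occ vrt n out) := by unfold Spec_build_operators; infer_instance

-- ===== CLAIM (what is proved, stated in full; the proofs are below) =====
def Claim_equal_build_operators : Prop := ∀ (occ : List Int) (vrt : List Int) (n : Int), Dom_build_operators occ vrt n → Pre_build_operators occ vrt n → Spec_build_operators occ vrt n (build_operators occ vrt n)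

-- ===== LEMMAS AND PROOFS =====

theorem bo_group_getD (vrt : List Int) (n s : Int) :
    (bo_group vrt n).getD s [] = vrt.filter (fun a => PySem.Int.floordiv a n == s) := by
  have h : vrt.foldl (fun d a => d.modify (PySem.Int.floordiv a n) [] (fun l => l ++ [a])) PySem.Dict.empty
      = (vrt.map (fun a => (PySem.Int.floordiv a n, a))).foldl
          (fun d (p : Int × Int) => d.modify p.1 [] (fun l => l ++ [p.2])) PySem.Dict.empty := by
    rw [List.foldl_map]
  rw [bo_group, h, PySem.Dict.getD_foldl_modify_append]
  simp [List.filter_map, Function.comp_def]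


theorem flatMap_filter_and {γ : Type} {p : Int → Bool} {q : Int → Int → Bool} (f : Int → Int → γ) (xs ys : List Int) :
    xs.flatMap (fun a => (ys.filter (fun b => p a && q a b)).map (f a))
      = (xs.filter p).flatMap (fun a => (ys.filter (q a)).map (f a)) := by
  induction xs with
  | nil => simp
  | cons a t ih => cases hpa : p a <;> simp [hpa, ih]

theorem filter_lt_comm (vrt : List Int) (n i a : Int) :
    (vrt.filter (fun b => PySem.Int.floordiv b n == PySem.Int.floordiv i n)).filter (fun b => a < b)
      = vrt.filter (fun b => (PySem.Int.floordiv b n == PySem.Int.floordiv i n) && decide (a < b)) := by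
  rw [List.filter_filter]
  apply List.filter_congr
  intro b _
  rw [Bool.and_comm]

theorem doubles_same (vrt : List Int) (n i j : Int)
    (hsj : PySem.Int.floordiv j n = PySem.Int.floordiv i n) (hij : i < j) :
    vrt.flatMap (fun a => (vrt.filter (fun b => is_xxxx i a j b n || is_xxyy i a j b n)).map
        (fun b => [i, a, j, b]))
      = (vrt.filter (fun a => PySem.Int.floordiv a n == PySem.Int.floordiv i n)).flatMap
          (fun a => ((vrt.filter (fun b => PySem.Int.floordiv b n == PySem.Int.floordiv i n)).filter
            (fun b => a < b)).map (fun b => [i, a, j, b])) := by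
  have hC : ∀ a b, (is_xxxx i a j b n || is_xxyy i a j b n)
      = ((PySem.Int.floordiv a n == PySem.Int.floordiv i n) &&
         ((PySem.Int.floordiv b n == PySem.Int.floordiv i n) && decide (a < b))) := by
    intro a b
    rw [Bool.eq_iff_iff]
    simp [is_xxxx, is_xxyy, hsj]
    omega
  simp only [hC]
  rw [flatMap_filter_and (p := fun a => PySem.Int.floordiv a n == PySem.Int.floordiv i n)
        (q := fun a b => (PySem.Int.floordiv b n == PySem.Int.floordiv i n) && decide (a < b)) (f := fun a b => [i, a, j, b])]
  simp only [filter_lt_comm]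

theorem doubles_none (vrt : List Int) (n i j : Int)
    (hsj : PySem.Int.floordiv j n = PySem.Int.floordiv i n) (hij : ¬ i < j) :
    vrt.flatMap (fun a => (vrt.filter (fun b => is_xxxx i a j b n || is_xxyy i a j b n)).map
        (fun b => [i, a, j, b])) = [] := by
  have hC : ∀ a b, (is_xxxx i a j b n || is_xxyy i a j b n) = false := by
    intro a b
    rw [Bool.eq_iff_iff]
    simp [is_xxxx, is_xxyy, hsj]
    omega
  simp [hC]

theorem doubles_cross (vrt : List Int) (n i j : Int)
    (hsj : ¬ PySem.Int.floordiv j n = PySem.Int.floordiv i n) :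
    vrt.flatMap (fun a => (vrt.filter (fun b => is_xxxx i a j b n || is_xxyy i a j b n)).map
        (fun b => [i, a, j, b]))
      = (vrt.filter (fun a => PySem.Int.floordiv a n == PySem.Int.floordiv i n)).flatMap
          (fun a => (vrt.filter (fun b => PySem.Int.floordiv b n == PySem.Int.floordiv j n)).map
            (fun b => [i, a, j, b])) := by
  have hC : ∀ a b, (is_xxxx i a j b n || is_xxyy i a j b n)
      = ((PySem.Int.floordiv a n == PySem.Int.floordiv i n) &&
         (PySem.Int.floordiv b n == PySem.Int.floordiv j n)) := by
    intro a b
    rw [Bool.eq_iff_iff]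
    simp [is_xxxx, is_xxyy]
    omega
  simp only [hC]
  rw [flatMap_filter_and (p := fun a => PySem.Int.floordiv a n == PySem.Int.floordiv i n)
        (q := fun a b => PySem.Int.floordiv b n == PySem.Int.floordiv j n) (f := fun a b => [i, a, j, b])]

theorem build_operators_eq_alt (occ vrt : List Int) (n : Int) :
    build_operators occ vrt n = build_operators_alt occ vrt n := by
  induction occ with
  | nil => rfl
  | cons i rest ih =>
    show _ ++ build_operators rest vrt n = _
    rw [ih]
    show _ = bo_emit (bo_group vrt n) n (i :: rest)
    unfold bo_emit
    congr 1
    have hsingles :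
        vrt.foldl (fun acc a => if is_xx i a n then acc ++ [[i, a]] else acc) []
          = ((bo_group vrt n).getD (PySem.Int.floordiv i n) []).map (fun a => [i, a]) := by
      rw [PySem.List.foldl_append_if, bo_group_getD, List.nil_append]
      congr 1
      apply List.filter_congr
      intro a _
      rw [Bool.eq_iff_iff]
      simp [is_xx]
      omega
    rw [hsingles]
    apply PySem.List.foldl_congr_mem
    intro acc j _
    simp only
    rw [show (fun (acc : List (List Int)) a =>
          vrt.foldl (fun acc b =>
            if is_xxxx i a j b n || is_xxyy i a j b n then acc ++ [[i, a, j, b]] else acc) acc)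
        = (fun acc a => acc ++ (vrt.filter (fun b => is_xxxx i a j b n || is_xxyy i a j b n)).map
            (fun b => [i, a, j, b])) from by
      funext acc a; rw [PySem.List.foldl_append_if]]
    rw [PySem.List.foldl_append_eq_flatMap]
    by_cases hsj : PySem.Int.floordiv j n = PySem.Int.floordiv i n
    · by_cases hij : i < j
      · rw [if_pos hsj, if_pos hij, doubles_same vrt n i j hsj hij, bo_group_getD]
      · rw [if_pos hsj, if_neg hij, doubles_none vrt n i j hsj hij, List.append_nil]
    · rw [if_neg hsj, doubles_cross vrt n i j hsj, bo_group_getD, bo_group_getD]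

-- ===== VERDICT (by name: the statement is the Claim_ definition above) =====
theorem build_operators_spec : Claim_equal_build_operators := by
  intro occ vrt n _ _
  show build_operators occ vrt n = build_operators_alt occ vrt n
  exact build_operators_eq_alt occ vrt n
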